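-- pv_equiv track=rewrite | github.com/jeff87654/Lifting | build_sn_topt.py | fpf_partitions
-- ===== SOURCE A (Python) =====
-- def fpf_partitions(n):
--     """All partitions of n into parts >= 2, sorted descending."""
--     def gen(remaining, max_part, prefix):
--         if remaining == 0:
--             yield prefix
--             return
--         for p in range(min(remaining, max_part), 1, -1):
--             yield from gen(remaining - p, p, prefix + [p])
--     return list(gen(n, n, []))
-- ===== SOURCE B (Python) =====
-- def fpf_partitions(n):
--     """All partitions of n into parts >= 2, sorted descending.
--
--     Bottom-up DP over remainders with shared tails: S[m] holds the partitions of m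
--     (parts >= 2, descending) as shared cons-cells (part, rest); off[m] records, for
--     each bound p, where the suffix of S[m] with first part <= p starts, so no search
--     or filtering is ever needed.
--     """
--     if n < 0:
--         return []
--     S = [[None]]
--     off = [[]]
--     for m in range(1, n + 1):
--         cur = []
--         offm = []
--         for p in range(m, 1, -1):
--             offm.append(len(cur))
--             j = m - p
--             tails = S[j]
--             start = 0 if p >= j else off[j][j - p]
--             cur += [(p, t) for t in tails[start:]]
--         S.append(cur)
--         off.append(offm)
--     out = []
--     for t in S[n]:
--         xs = []
--         while t is not None:
--             xs.append(t[0])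
--             t = t[1]
--         out.append(xs)
--     return out
-- ===== Notes on version B (the rewrite author's own statement) =====
-- stated objective: alternative
-- what changed: Replaced the recursive prefix-accumulating generator with a bottom-up dynamic program: S[m] holds all partitions of m (parts >= 2, descending) built from memoized shared tails, and an offset table off[m] recorded while each row is built gives O(1) access to the suffix of S[m] whose parts are <= p, so no recursion, prefix copying or search is needed.
import Mathlib
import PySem

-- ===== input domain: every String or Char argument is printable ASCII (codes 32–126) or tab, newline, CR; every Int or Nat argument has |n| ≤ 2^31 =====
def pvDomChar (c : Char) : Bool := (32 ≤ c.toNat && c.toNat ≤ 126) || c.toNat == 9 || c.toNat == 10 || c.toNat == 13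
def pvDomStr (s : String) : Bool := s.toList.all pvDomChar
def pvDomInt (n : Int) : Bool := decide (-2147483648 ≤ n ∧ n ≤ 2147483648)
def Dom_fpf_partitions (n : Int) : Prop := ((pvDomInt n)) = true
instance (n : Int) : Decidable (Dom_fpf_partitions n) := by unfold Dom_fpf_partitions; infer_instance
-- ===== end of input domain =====

-- B replaces A's recursive prefix-accumulating generator by a bottom-up dynamic program over
-- remainders with memoized shared tails and recorded suffix offsets (alternative algorithm).

-- ===== PORT A =====
-- fuel only makes the recursion structural; it is provably sufficient (fpf_gen_fuel below) and never cuts the computation short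
def fpf_gen : Nat → Int → Int → List Int → List (List Int)
  | 0, _, _, _ => []
  | fuel + 1, remaining, max_part, pre =>
    if remaining = 0 then [pre]
    else
      (PySem.List.pyRange (min remaining max_part) 1 (-1)).flatMap
        (fun p => fpf_gen fuel (remaining - p) p (pre ++ [p]))

def fpf_partitions (n : Int) : List (List Int) := fpf_gen (n.toNat + 1) n n []

-- ===== PORT B =====
-- Python's shared cons-cells (p, rest) / None are exactly Lean's p :: rest / []
-- the inner 'while t is not None' materialisation walk
def fpf_walk : List Int → List Int → List Int
  | [], xs => xs
  | h :: t, xs => fpf_walk t (xs ++ [h])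

-- the 'for p in range(m, 1, -1)' row-building loop; state = (cur, offm)
-- (Python indexes S[j] and off[j][j-p]; those indices are always in range while the
--  rows 0..m-1 are present, so pyGetD with defaults is exact there)
def fpf_bRow (S : List (List (List Int))) (off : List (List Int)) (m : Int) :
    List (List Int) × List Int :=
  (PySem.List.pyRange m 1 (-1)).foldl
    (fun st p =>
      let offm := st.2 ++ [PySem.List.len st.1]
      let j := m - p
      let tails := PySem.List.pyGetD S j []
      let start : Int := if j ≤ p then 0 else PySem.List.pyGetD (PySem.List.pyGetD off j []) (j - p) 0
      (st.1 ++ (PySem.List.slice tails (some start)).map (fun t => p :: t), offm))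
    ([], [])

-- the 'for m in range(1, n + 1)' loop; state = (S, off)
def fpf_bBuild (n : Int) : List (List (List Int)) × List (List Int) :=
  (PySem.List.pyRange 1 (n + 1)).foldl
    (fun st m =>
      let row := fpf_bRow st.1 st.2 m
      (st.1 ++ [row.1], st.2 ++ [row.2]))
    ([[[]]], [[]])

def fpf_partitions_alt (n : Int) : List (List Int) :=
  if n < 0 then []
  else (PySem.List.pyGetD (fpf_bBuild n).1 n []).foldl (fun out t => out ++ [fpf_walk t []]) []

-- ===== PRECONDITION & SPEC =====
def Spec_fpf_partitions (n : Int) (out : List (List Int)) : Prop := out = fpf_partitions_alt n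
instance (n : Int) (out : List (List Int)) : Decidable (Spec_fpf_partitions n out) := by unfold Spec_fpf_partitions; infer_instance

-- ===== CLAIM (what is proved, stated in full; the proofs are below) =====
def Claim_equal_fpf_partitions : Prop := ∀ (n : Int), Dom_fpf_partitions n → Spec_fpf_partitions n (fpf_partitions n)

-- ===== LEMMAS AND PROOFS =====

-- A's result at (m, k) with empty prefix: the reference value both sides are related to
def fpf_G (m k : Int) : List (List Int) := fpf_gen (m.toNat + 1) m k []

-- the block of partitions with first part p, as both programs produce it
def fpf_blk (m p : Int) : List (List Int) := (fpf_G (m - p) p).map (fun t => p :: t)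

theorem fpf_gen_fuel : ∀ (f1 f2 : Nat) (rem mp : Int) (pre : List Int),
    rem.toNat < f1 → rem.toNat < f2 → fpf_gen f1 rem mp pre = fpf_gen f2 rem mp pre := by
  intro f1
  induction f1 with
  | zero => intro f2 rem mp pre h1 _; omega
  | succ m ih =>
    intro f2 rem mp pre h1 h2
    cases f2 with
    | zero => omega
    | succ k =>
      simp only [fpf_gen]
      by_cases h0 : rem = 0
      · simp [h0]
      · simp only [if_neg h0]
        apply List.flatMap_congr
        intro p hp
        have hm := (PySem.List.mem_pyRange_neg_one).mp hp
        exact ih k (rem - p) p (pre ++ [p]) (by omega) (by omega)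

theorem fpf_gen_prefix : ∀ (fuel : Nat) (rem mp : Int) (pre : List Int),
    fpf_gen fuel rem mp pre = (fpf_gen fuel rem mp []).map (pre ++ ·) := by
  intro fuel
  induction fuel with
  | zero => intro rem mp pre; simp [fpf_gen]
  | succ m ih =>
    intro rem mp pre
    simp only [fpf_gen]
    by_cases h0 : rem = 0
    · simp [h0]
    · simp only [if_neg h0, List.map_flatMap]
      apply List.flatMap_congr
      intro p _
      rw [ih (rem - p) p (pre ++ [p]), ih (rem - p) p ([] ++ [p]), List.map_map]
      apply List.map_congr_left
      intro t _
      simp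

theorem fpf_G_rec (m k : Int) (hm : m ≠ 0) :
    fpf_G m k = (PySem.List.pyRange (min m k) 1 (-1)).flatMap (fpf_blk m) := by
  show fpf_gen (m.toNat + 1) m k [] = _
  simp only [fpf_gen, if_neg hm]
  apply List.flatMap_congr
  intro p hp
  have hb := (PySem.List.mem_pyRange_neg_one).mp hp
  have h1 : 1 < p := hb.1
  have h2 : p ≤ min m k := hb.2
  rw [fpf_gen_fuel m.toNat ((m - p).toNat + 1) (m - p) p ([] ++ [p]) (by omega) (by omega)]
  rw [fpf_gen_prefix ((m - p).toNat + 1) (m - p) p ([] ++ [p])]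
  rfl

theorem fpf_G_of_ge (j p : Int) (hj : 0 ≤ j) (hp : j ≤ p) : fpf_G j p = fpf_G j j := by
  by_cases h0 : j = 0
  · subst h0; rfl
  · rw [fpf_G_rec j p h0, fpf_G_rec j j h0, min_eq_left hp, min_self]

theorem fpf_descCons (a : Int) (ha : 2 ≤ a) :
    PySem.List.pyRange a 1 (-1) = a :: PySem.List.pyRange (a - 1) 1 (-1) := by
  rw [PySem.List.pyRange_neg_one_eq_reverse, PySem.List.pyRange_neg_one_eq_reverse]
  rw [show a + 1 = (a - 1 + 1) + 1 from by ring, PySem.List.pyRange_one_succ_right (by omega)]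
  simp

theorem fpf_descLen : ∀ (k : Nat) (a : Int), a = (k : Int) + 1 →
    (PySem.List.pyRange a 1 (-1)).length = k := by
  intro k
  induction k with
  | zero =>
    intro a ha
    rw [PySem.List.pyRange_neg_one_eq_reverse, PySem.List.pyRange_one_eq_nil (by omega)]
    rfl
  | succ k ih =>
    intro a ha
    rw [fpf_descCons a (by omega)]
    simp [ih (a - 1) (by omega)]

theorem fpf_descDrop : ∀ (i : Nat) (a : Int), 1 ≤ a → (i : Int) ≤ a - 1 →
    (PySem.List.pyRange a 1 (-1)).drop i = PySem.List.pyRange (a - (i : Int)) 1 (-1) := by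
  intro i
  induction i with
  | zero => intro a _ _; simp
  | succ i ih =>
    intro a ha hi
    have h2 : 2 ≤ a := by omega
    rw [fpf_descCons a h2]
    rw [List.drop_succ_cons, ih (a - 1) (by omega) (by push_cast at hi ⊢; omega)]
    congr 1
    push_cast
    ring

-- the row-building loop shape: cur collects the blocks, offm the lengths before each block
theorem fpf_rowFold (f : Int → List (List Int)) : ∀ (l : List Int) (cur : List (List Int)) (offm : List Int),
    l.foldl (fun st p => (st.1 ++ f p, st.2 ++ [PySem.List.len st.1])) (cur, offm)
    = (cur ++ l.flatMap f,
       offm ++ (List.range l.length).map (fun i => PySem.List.len (cur ++ (l.take i).flatMap f))) := by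
  intro l
  induction l with
  | nil => intro cur offm; simp
  | cons p t ih =>
    intro cur offm
    simp only [List.foldl_cons, ih, List.flatMap_cons, List.length_cons,
      List.range_succ_eq_map, List.map_cons, List.map_map]
    refine Prod.ext ?_ ?_ <;>
      simp [Function.comp_def, List.append_assoc]

-- the table invariant: the first M rows of (S, off) are correct
def fpf_TInv (M : Nat) (S : List (List (List Int))) (off : List (List Int)) : Prop :=
  S.length = M ∧ off.length = M ∧
  (∀ j : Int, 0 ≤ j → j < (M : Int) → PySem.List.pyGetD S j [] = fpf_G j j) ∧
  (∀ j p : Int, 2 ≤ p → p < j → j < (M : Int) →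
    0 ≤ PySem.List.pyGetD (PySem.List.pyGetD off j []) (j - p) 0 ∧
    (PySem.List.pyGetD S j []).drop (PySem.List.pyGetD (PySem.List.pyGetD off j []) (j - p) 0).toNat
      = fpf_G j p)

theorem fpf_len_eq {α : Type} (xs : List α) : PySem.List.len xs = (xs.length : Int) := by
  simp [PySem.List.len]

theorem fpf_getD_append_left {α : Type} (xs ys : List α) (i : Int) (d : α)
    (h0 : 0 ≤ i) (h1 : i < (xs.length : Int)) :
    PySem.List.pyGetD (xs ++ ys) i d = PySem.List.pyGetD xs i d := by
  rw [PySem.List.pyGetD_of_nonneg _ _ h0, PySem.List.pyGetD_of_nonneg _ _ h0,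
    List.getD_eq_getElem?_getD, List.getElem?_append_left (by omega),
    ← List.getD_eq_getElem?_getD]

theorem fpf_getD_append_self {α : Type} (xs : List α) (y : α) (i : Int) (d : α)
    (hi : i = (xs.length : Int)) :
    PySem.List.pyGetD (xs ++ [y]) i d = y := by
  subst hi
  rw [PySem.List.pyGetD_of_nonneg _ _ (by positivity),
    List.getD_eq_getElem?_getD, List.getElem?_append_right (by simp)]
  simp

theorem fpf_rowCorrect (M : Nat) (S : List (List (List Int))) (off : List (List Int))
    (hInv : fpf_TInv M S off) (m : Int) (hm : 1 ≤ m) (hM : m = (M : Int)) :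
    (fpf_bRow S off m).1 = fpf_G m m ∧
    (∀ p : Int, 2 ≤ p → p < m →
      0 ≤ PySem.List.pyGetD (fpf_bRow S off m).2 (m - p) 0 ∧
      (fpf_bRow S off m).1.drop (PySem.List.pyGetD (fpf_bRow S off m).2 (m - p) 0).toNat
        = fpf_G m p) := by
  obtain ⟨hSlen, hofflen, hrows, hoffq⟩ := hInv
  have hL : (PySem.List.pyRange m 1 (-1)).length = (m - 1).toNat :=
    fpf_descLen (m - 1).toNat m (by omega)
  have hrow : fpf_bRow S off m
      = (PySem.List.pyRange m 1 (-1)).foldl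
          (fun st p => (st.1 ++ fpf_blk m p, st.2 ++ [PySem.List.len st.1])) ([], []) := by
    unfold fpf_bRow
    apply PySem.List.foldl_congr_mem
    intro st p hp
    have hb := (PySem.List.mem_pyRange_neg_one).mp hp
    have h1 : 1 < p := hb.1
    have h2 : p ≤ m := hb.2
    have hj0 : 0 ≤ m - p := by omega
    have hjM : m - p < (M : Int) := by omega
    have htails : PySem.List.pyGetD S (m - p) [] = fpf_G (m - p) (m - p) :=
      hrows (m - p) hj0 hjM
    by_cases hle : m - p ≤ p
    · simp only [if_pos hle]
      rw [PySem.List.slice_from _ le_rfl]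
      simp only [Int.toNat_zero, List.drop_zero, htails]
      rw [← fpf_G_of_ge (m - p) p hj0 hle]
      rfl
    · simp only [if_neg hle]
      have hq := hoffq (m - p) p (by omega) (by omega) hjM
      rw [PySem.List.slice_from _ hq.1]
      rw [htails] at hq
      rw [htails, hq.2]
      rfl
  rw [hrow, fpf_rowFold (fpf_blk m)]
  simp only [List.nil_append]
  have hm0 : m ≠ 0 := by omega
  have hfirst : (PySem.List.pyRange m 1 (-1)).flatMap (fpf_blk m) = fpf_G m m := by
    rw [fpf_G_rec m m hm0, min_self]
  refine ⟨hfirst, ?_⟩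
  intro p h2 hpm
  have hi : ((m - p).toNat : Int) = m - p := by omega
  have hilt : (m - p).toNat < (PySem.List.pyRange m 1 (-1)).length := by
    rw [hL]; omega
  have hget : PySem.List.pyGetD
      ((List.range (PySem.List.pyRange m 1 (-1)).length).map
        (fun i => PySem.List.len (((PySem.List.pyRange m 1 (-1)).take i).flatMap (fpf_blk m))))
      (m - p) 0
      = PySem.List.len ((((PySem.List.pyRange m 1 (-1)).take (m - p).toNat)).flatMap (fpf_blk m)) := by
    rw [PySem.List.pyGetD_of_nonneg _ _ (by omega)]
    exact PySem.List.getD_map_range _ _ _ _ hilt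
  rw [hget, fpf_len_eq]
  refine ⟨by positivity, ?_⟩
  rw [Int.toNat_natCast]
  have hsplit : (PySem.List.pyRange m 1 (-1)).flatMap (fpf_blk m)
      = ((PySem.List.pyRange m 1 (-1)).take (m - p).toNat).flatMap (fpf_blk m)
        ++ ((PySem.List.pyRange m 1 (-1)).drop (m - p).toNat).flatMap (fpf_blk m) := by
    rw [← List.flatMap_append, List.take_append_drop]
  rw [hsplit, List.drop_left]
  rw [fpf_descDrop (m - p).toNat m (by omega) (by omega)]
  rw [hi, show m - (m - p) = p from by ring]
  rw [fpf_G_rec m p hm0, min_eq_right (by omega)]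

theorem fpf_buildInv : ∀ (t : Nat),
    fpf_TInv (t + 1)
      ((PySem.List.pyRange 1 ((t : Int) + 1)).foldl
        (fun st m =>
          let row := fpf_bRow st.1 st.2 m
          (st.1 ++ [row.1], st.2 ++ [row.2]))
        ([[[]]], [[]])).1
      ((PySem.List.pyRange 1 ((t : Int) + 1)).foldl
        (fun st m =>
          let row := fpf_bRow st.1 st.2 m
          (st.1 ++ [row.1], st.2 ++ [row.2]))
        ([[[]]], [[]])).2 := by
  intro t
  induction t with
  | zero =>
    rw [show ((0 : Nat) : Int) + 1 = 1 from rfl, PySem.List.pyRange_one_eq_nil le_rfl]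
    simp only [List.foldl_nil]
    refine ⟨rfl, rfl, ?_, ?_⟩
    · intro j hj0 hjlt
      have hj : j = 0 := by omega
      subst hj
      decide
    · intro j p h2 hpj hjlt
      omega
  | succ t ih =>
    have hsplit : PySem.List.pyRange 1 (((t + 1 : Nat) : Int) + 1)
        = PySem.List.pyRange 1 ((t : Int) + 1) ++ [(t : Int) + 1] := by
      rw [show ((t + 1 : Nat) : Int) + 1 = ((t : Int) + 1) + 1 from by push_cast; ring,
        PySem.List.pyRange_one_succ_right (by omega)]
    rw [hsplit, List.foldl_append]
    set st := (PySem.List.pyRange 1 ((t : Int) + 1)).foldl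
      (fun st m =>
        let row := fpf_bRow st.1 st.2 m
        (st.1 ++ [row.1], st.2 ++ [row.2]))
      ([[[]]], [[]]) with hst
    simp only [List.foldl_cons, List.foldl_nil]
    have hrc := fpf_rowCorrect (t + 1) st.1 st.2 ih ((t : Int) + 1) (by omega) (by push_cast; ring)
    set row := fpf_bRow st.1 st.2 ((t : Int) + 1) with hrowdef
    refine ⟨by simp [ih.1], by simp [ih.2.1], ?_, ?_⟩
    · intro j hj0 hjlt
      by_cases hlt : j < ((t + 1 : Nat) : Int)
      · rw [fpf_getD_append_left _ _ _ _ hj0 (by rw [ih.1]; exact_mod_cast hlt)]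
        exact ih.2.2.1 j hj0 hlt
      · have hj : j = (t : Int) + 1 := by push_cast at hjlt hlt; omega
        rw [fpf_getD_append_self st.1 _ j [] (by rw [ih.1]; push_cast; omega)]
        rw [hj]
        exact hrc.1
    · intro j p h2 hpj hjlt
      by_cases hlt : j < ((t + 1 : Nat) : Int)
      · have hj0 : 0 ≤ j := by omega
        rw [fpf_getD_append_left _ _ _ _ hj0 (by rw [ih.2.1]; exact_mod_cast hlt),
          fpf_getD_append_left _ _ _ _ hj0 (by rw [ih.1]; exact_mod_cast hlt)]
        exact ih.2.2.2 j p h2 hpj hlt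
      · have hj : j = (t : Int) + 1 := by push_cast at hjlt hlt; omega
        rw [fpf_getD_append_self st.2 _ j [] (by rw [ih.2.1]; push_cast; omega),
          fpf_getD_append_self st.1 _ j [] (by rw [ih.1]; push_cast; omega)]
        subst hj
        exact hrc.2 p h2 (by omega)

theorem fpf_walk_eq : ∀ (t xs : List Int), fpf_walk t xs = xs ++ t := by
  intro t
  induction t with
  | nil => intro xs; simp [fpf_walk]
  | cons h tl ih => intro xs; simp [fpf_walk, ih]

-- ===== VERDICT (by name: the statement is the Claim_ definition above) =====
theorem fpf_partitions_spec : Claim_equal_fpf_partitions := by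
  intro n _
  unfold Spec_fpf_partitions fpf_partitions fpf_partitions_alt
  by_cases hneg : n < 0
  · rw [if_pos hneg]
    show fpf_gen (n.toNat + 1) n n [] = []
    rw [show n.toNat + 1 = 0 + 1 from by omega]
    simp only [fpf_gen, if_neg (show n ≠ 0 from by omega)]
    rw [min_self, PySem.List.pyRange_neg_one_eq_reverse,
      PySem.List.pyRange_one_eq_nil (by omega)]
    rfl
  · rw [if_neg hneg]
    have hn : 0 ≤ n := by omega
    have hinv := fpf_buildInv n.toNat
    have he : ((n.toNat : Nat) : Int) + 1 = n + 1 := by omega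
    rw [he] at hinv
    have hS := hinv.2.2.1 n hn (by omega)
    show fpf_gen (n.toNat + 1) n n []
        = (PySem.List.pyGetD (fpf_bBuild n).1 n []).foldl (fun out t => out ++ [fpf_walk t []]) []
    rw [show (fpf_bBuild n).1
        = ((PySem.List.pyRange 1 (n + 1)).foldl
            (fun st m =>
              let row := fpf_bRow st.1 st.2 m
              (st.1 ++ [row.1], st.2 ++ [row.2]))
            ([[[]]], [[]])).1 from rfl, hS]
    rw [PySem.List.foldl_append_singleton_eq_map (fun t => fpf_walk t [])]
    have : (fpf_G n n).map (fun t => fpf_walk t []) = fpf_G n n := by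
      rw [List.map_congr_left (fun t _ => fpf_walk_eq t [])]
      simp
    rw [this]
    rfl
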